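-- pv_equiv track=rewrite | github.com/bhavyabgada/drone_teaching_package | python-lessons/lesson9.py | generate_route
-- ===== SOURCE A (Python) =====
-- from typing import List, Tuple, Dict
--
-- def generate_route(waypoints: List[Tuple[int, int, int]]) -> List[Dict]:
--     """Generate optimized route through waypoints"""
--     route = []
--     current_pos = (0, 0, 0)
--
--     for point in waypoints:
--         x, y, z = point
--         dx = x - current_pos[0]
--         dy = y - current_pos[1]
--         dz = z - current_pos[2]
--
--         if dz != 0:
--             route.append({"up" if dz > 0 else "down": abs(dz)})
--         if dx != 0:
--             route.append({"forward" if dx > 0 else "back": abs(dx)})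
--         if dy != 0:
--             route.append({"right" if dy > 0 else "left": abs(dy)})
--
--         current_pos = point
--
--     return route
-- ===== SOURCE B (Python) =====
-- def _axis_cmds(coords, pos, neg):
--     """One whole pass over a single axis: optional command per consecutive pair."""
--     return [None if b == a else {pos if b > a else neg: abs(b - a)}
--             for a, b in zip(coords, coords[1:])]
--
-- def generate_route(waypoints):
--     """Generate optimized route through waypoints.
--
--     Structure-of-arrays: split the waypoints into three coordinate columns,
--     run an independent per-axis pass producing a command stream per axis,
--     then interleave the three streams (z, x, y per step), dropping Nones.
--     """
--     zs = _axis_cmds([0] + [p[2] for p in waypoints], "up", "down")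
--     xs = _axis_cmds([0] + [p[0] for p in waypoints], "forward", "back")
--     ys = _axis_cmds([0] + [p[1] for p in waypoints], "right", "left")
--     return [c for triple in zip(zs, xs, ys) for c in triple if c is not None]
-- ===== Notes on version B (the rewrite author's own statement) =====
-- stated objective: alternative
-- what changed: Replaces A's row-wise accumulator loop by a structure-of-arrays design: the waypoints are split into three coordinate columns, each axis is processed in its own independent pass producing an optional-command stream, and the three streams are then interleaved (z, x, y per step) dropping the empty slots.
import Mathlib
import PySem

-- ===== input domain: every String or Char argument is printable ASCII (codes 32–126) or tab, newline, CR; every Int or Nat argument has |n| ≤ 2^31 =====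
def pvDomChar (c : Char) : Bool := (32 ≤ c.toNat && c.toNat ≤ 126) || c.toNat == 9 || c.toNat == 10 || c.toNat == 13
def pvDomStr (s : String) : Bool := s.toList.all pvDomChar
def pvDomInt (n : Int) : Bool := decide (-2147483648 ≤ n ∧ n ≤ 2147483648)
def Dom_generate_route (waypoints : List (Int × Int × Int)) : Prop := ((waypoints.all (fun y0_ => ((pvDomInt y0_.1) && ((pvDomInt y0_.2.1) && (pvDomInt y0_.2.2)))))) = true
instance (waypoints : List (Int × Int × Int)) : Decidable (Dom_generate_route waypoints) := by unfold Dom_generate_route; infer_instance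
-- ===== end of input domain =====

-- B trades A's row-wise accumulator loop for three independent per-axis passes over
-- coordinate columns, merged by interleaving; objective: alternative design, same cost.

-- ===== PORT A =====
def generate_route (waypoints : List (Int × Int × Int)) : List (List (String × Int)) :=
  (waypoints.foldl
    (fun (st : List (List (String × Int)) × (Int × Int × Int)) point =>
      let x := point.1; let y := point.2.1; let z := point.2.2
      let dx := x - st.2.1
      let dy := y - st.2.2.1
      let dz := z - st.2.2.2
      let r1 := if dz ≠ 0 then st.1 ++ [[((if dz > 0 then "up" else "down"), |dz|)]] else st.1
      let r2 := if dx ≠ 0 then r1 ++ [[((if dx > 0 then "forward" else "back"), |dx|)]] else r1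
      let r3 := if dy ≠ 0 then r2 ++ [[((if dy > 0 then "right" else "left"), |dy|)]] else r2
      (r3, point))
    ([], (0, 0, 0))).1

-- ===== PORT B =====
-- one per-axis pass: an optional command for each consecutive coordinate pair
def pvAxisCmds (coords : List Int) (pos neg : String) : List (Option (List (String × Int))) :=
  (coords.zip coords.tail).map (fun ab =>
    if ab.2 = ab.1 then none
    else some [((if ab.2 > ab.1 then pos else neg), |ab.2 - ab.1|)])

def generate_route_alt (waypoints : List (Int × Int × Int)) : List (List (String × Int)) :=
  let zc := pvAxisCmds (0 :: waypoints.map (fun p => p.2.2)) "up" "down"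
  let xc := pvAxisCmds (0 :: waypoints.map (fun p => p.1)) "forward" "back"
  let yc := pvAxisCmds (0 :: waypoints.map (fun p => p.2.1)) "right" "left"
  ((zc.zip xc).zip yc).flatMap (fun t => [t.1.1, t.1.2, t.2].filterMap id)

-- ===== PRECONDITION & SPEC =====
def Spec_generate_route (waypoints : List (Int × Int × Int)) (out : List (List (String × Int))) : Prop := out = generate_route_alt waypoints
instance (waypoints : List (Int × Int × Int)) (out : List (List (String × Int))) : Decidable (Spec_generate_route waypoints out) := by unfold Spec_generate_route; infer_instance

-- ===== CLAIM (what is proved, stated in full; the proofs are below) =====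
def Claim_equal_generate_route : Prop := ∀ (waypoints : List (Int × Int × Int)), Dom_generate_route waypoints → Spec_generate_route waypoints (generate_route waypoints)

-- ===== LEMMAS AND PROOFS =====

-- reference: the route emitted from a given current position, recursively
def pvRoute (cur : Int × Int × Int) : List (Int × Int × Int) → List (List (String × Int))
  | [] => []
  | p :: rest =>
    let dz := p.2.2 - cur.2.2
    let dx := p.1 - cur.1
    let dy := p.2.1 - cur.2.1
    ((if dz ≠ 0 then [[((if dz > 0 then "up" else "down"), |dz|)]] else []) ++
     (if dx ≠ 0 then [[((if dx > 0 then "forward" else "back"), |dx|)]] else []) ++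
     (if dy ≠ 0 then [[((if dy > 0 then "right" else "left"), |dy|)]] else [])) ++ pvRoute p rest

lemma pvA_fold_eq (ws : List (Int × Int × Int)) (cur : Int × Int × Int)
    (acc : List (List (String × Int))) :
    (ws.foldl
      (fun (st : List (List (String × Int)) × (Int × Int × Int)) point =>
        let x := point.1; let y := point.2.1; let z := point.2.2
        let dx := x - st.2.1
        let dy := y - st.2.2.1
        let dz := z - st.2.2.2
        let r1 := if dz ≠ 0 then st.1 ++ [[((if dz > 0 then "up" else "down"), |dz|)]] else st.1
        let r2 := if dx ≠ 0 then r1 ++ [[((if dx > 0 then "forward" else "back"), |dx|)]] else r1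
        let r3 := if dy ≠ 0 then r2 ++ [[((if dy > 0 then "right" else "left"), |dy|)]] else r2
        (r3, point))
      (acc, cur)).1
    = acc ++ pvRoute cur ws := by
  induction ws generalizing cur acc with
  | nil => simp [pvRoute]
  | cons p rest ih =>
    simp only [List.foldl_cons]
    rw [ih]
    simp only [pvRoute]
    split_ifs <;> simp

lemma pvAxisCmds_cons (c a : Int) (l : List Int) (pos neg : String) :
    pvAxisCmds (c :: a :: l) pos neg
    = (if a = c then none else some [((if a > c then pos else neg), |a - c|)])
      :: pvAxisCmds (a :: l) pos neg := by
  simp [pvAxisCmds]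

lemma pvB_eq (ws : List (Int × Int × Int)) (cx cy cz : Int) :
    ((((pvAxisCmds (cz :: ws.map (fun p => p.2.2)) "up" "down").zip
       (pvAxisCmds (cx :: ws.map (fun p => p.1)) "forward" "back")).zip
       (pvAxisCmds (cy :: ws.map (fun p => p.2.1)) "right" "left")).flatMap
      (fun t => [t.1.1, t.1.2, t.2].filterMap id))
    = pvRoute (cx, cy, cz) ws := by
  induction ws generalizing cx cy cz with
  | nil => simp [pvAxisCmds, pvRoute]
  | cons p rest ih =>
    simp only [List.map_cons, pvAxisCmds_cons, List.zip_cons_cons, List.flatMap_cons]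
    rw [ih p.1 p.2.1 p.2.2]
    simp only [pvRoute]
    congr 1
    have hz : p.2.2 - cz ≠ 0 ↔ ¬ p.2.2 = cz := by omega
    have hx : p.1 - cx ≠ 0 ↔ ¬ p.1 = cx := by omega
    have hy : p.2.1 - cy ≠ 0 ↔ ¬ p.2.1 = cy := by omega
    have gz : p.2.2 - cz > 0 ↔ p.2.2 > cz := by omega
    have gx : p.1 - cx > 0 ↔ p.1 > cx := by omega
    have gy : p.2.1 - cy > 0 ↔ p.2.1 > cy := by omega
    simp only [hz, hx, hy, gz, gx, gy]
    split_ifs <;> simp [List.filterMap]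

-- ===== VERDICT (by name: the statement is the Claim_ definition above) =====
theorem generate_route_spec : Claim_equal_generate_route := by
  intro ws _
  show generate_route ws = generate_route_alt ws
  unfold generate_route generate_route_alt
  rw [pvA_fold_eq, pvB_eq]
  simp
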